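-- pv_equiv track=rewrite | github.com/JohnGee96/CodingPractice | interview/adjMatchingChar.py | minReplaceWord
-- ===== SOURCE A (Python) =====
-- def minReplaceWord(word):
--     traverse_len = len(word)
--     num_replace = 0
--     if traverse_len == 1:
--         return 0
--     elif traverse_len == 2:
--         return int(word[0] == word[1]) # Corner case: only two-char word
--
--     head, tail = 1, 0
--     while head < traverse_len:
--         if word[head] == word[tail]:
--             head += 1
--         else:
--             if head != tail + 1: # There's repetition
--                 num_replace += (head - tail) // 2
--                 tail = head - 1
--             head += 1
--             tail += 1
--         if head == traverse_len - 1 and word[head] == word[tail]: # Corner case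
--             num_replace += (head - tail + 1) // 2 # Add one because min repetition is 2
--     return num_replace
-- ===== SOURCE B (Python) =====
-- def minReplaceWord(word):
--     count = 0
--     i = 0
--     n = len(word)
--     while i + 1 < n:
--         if word[i] == word[i + 1]:
--             count += 1
--             i += 2
--         else:
--             i += 1
--     return count
-- ===== Notes on version B (the rewrite author's own statement) =====
-- stated objective: simpler
-- what changed: Replaces A's run-boundary two-pointer machinery (tail/head, run-length // 2, end-of-word corner patches) by a greedy scan that counts disjoint adjacent equal pairs, skipping two positions when a pair is found; less work per character (no tail bookkeeping, no division, fewer comparisons).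
import Mathlib
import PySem

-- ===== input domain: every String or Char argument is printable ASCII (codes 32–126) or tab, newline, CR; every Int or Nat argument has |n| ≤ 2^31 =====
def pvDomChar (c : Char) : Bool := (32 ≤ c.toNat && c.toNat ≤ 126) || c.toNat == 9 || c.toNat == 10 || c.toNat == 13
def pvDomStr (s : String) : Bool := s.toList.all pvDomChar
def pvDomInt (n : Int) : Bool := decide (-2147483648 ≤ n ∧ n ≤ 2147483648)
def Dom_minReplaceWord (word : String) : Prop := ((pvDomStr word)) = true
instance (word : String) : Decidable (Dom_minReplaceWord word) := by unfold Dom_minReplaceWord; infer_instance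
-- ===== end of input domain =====

-- B replaces A's run-boundary two-pointer machinery by a greedy scan that counts disjoint
-- adjacent equal pairs, skipping two positions per pair (objective: simpler).

-- ===== PORT A =====
-- A's while loop; every path does head += 1, so the loop is recursion on head.
-- Indices head/tail always satisfy 0 ≤ idx < n when read, so List.pyGetD is exact here.
def minReplaceWordLoop (w : List Char) (n : Int) (head tail num : Int) : Int :=
  if _h : head < n then
    let tn : Int × Int :=
      if PySem.List.pyGetD w head ' ' = PySem.List.pyGetD w tail ' ' then
        (tail, num)
      else if head ≠ tail + 1 then
        (head, num + PySem.Int.floordiv (head - tail) 2)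
      else
        (tail + 1, num)
    let head' := head + 1
    let num' :=
      if head' = n - 1 ∧ PySem.List.pyGetD w head' ' ' = PySem.List.pyGetD w tn.1 ' ' then
        tn.2 + PySem.Int.floordiv (head' - tn.1 + 1) 2
      else tn.2
    minReplaceWordLoop w n head' tn.1 num'
  else num
termination_by (n - head).toNat
decreasing_by omega

def minReplaceWord (word : String) : Int :=
  let w := word.toList
  let n : Int := w.length
  if n = 1 then 0
  else if n = 2 then
    (if PySem.List.pyGetD w 0 ' ' = PySem.List.pyGetD w 1 ' ' then 1 else 0)
  else minReplaceWordLoop w n 1 0 0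

-- ===== PORT B =====
-- B's while loop: i advances by 2 after a counted pair, by 1 otherwise.
def minReplaceWordAltLoop (w : List Char) (n : Int) (i count : Int) : Int :=
  if _h : i + 1 < n then
    if PySem.List.pyGetD w i ' ' = PySem.List.pyGetD w (i + 1) ' ' then
      minReplaceWordAltLoop w n (i + 2) (count + 1)
    else
      minReplaceWordAltLoop w n (i + 1) count
  else count
termination_by (n - i).toNat
decreasing_by all_goals omega

def minReplaceWord_alt (word : String) : Int :=
  let w := word.toList
  minReplaceWordAltLoop w w.length 0 0

-- ===== PRECONDITION & SPEC =====
def Spec_minReplaceWord (word : String) (out : Int) : Prop := out = minReplaceWord_alt word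
instance (word : String) (out : Int) : Decidable (Spec_minReplaceWord word out) := by unfold Spec_minReplaceWord; infer_instance

-- ===== CLAIM (what is proved, stated in full; the proofs are below) =====
def Claim_equal_minReplaceWord : Prop := ∀ (word : String), Dom_minReplaceWord word → Spec_minReplaceWord word (minReplaceWord word)

-- ===== LEMMAS AND PROOFS =====

-- Common specification: `runsum c k rest` = replacements still to be counted when the current
-- run has character c, length k, and rest of the word is `rest`.
def runsum (c : Char) (k : Int) (rest : List Char) : Int :=
  match rest with
  | [] => PySem.Int.floordiv k 2
  | d :: rs => if d = c then runsum c (k + 1) rs else PySem.Int.floordiv k 2 + runsum d 1 rs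

-- B's specification: number of disjoint adjacent equal pairs, consumed greedily left to right.
def pairCount : List Char → Int
  | c :: d :: rest => if d = c then 1 + pairCount rest else pairCount (d :: rest)
  | _ => 0

theorem fd_one : PySem.Int.floordiv 1 2 = 0 := by decide

theorem loopA_runsum (w : List Char) (m : Nat) :
    ∀ (head tail : Nat) (num : Int), w.length - head ≤ m → tail < head → head < w.length →
    (head + 1 = w.length → w.getD head ' ' ≠ w.getD tail ' ') →
    minReplaceWordLoop w (w.length : Int) (head : Int) (tail : Int) num
      = num + runsum (w.getD tail ' ') ((head : Int) - (tail : Int)) (w.drop head) := by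
  induction m with
  | zero => intro head tail num hm ht hlt _; exact absurd hlt (by omega)
  | succ m ih =>
    intro head tail num hm ht hlt hcorner
    have hdrop : w.drop head = w[head] :: w.drop (head + 1) := List.drop_eq_getElem_cons hlt
    have hget : w.getD head ' ' = w[head] := List.getD_eq_getElem w ' ' hlt
    rw [minReplaceWordLoop.eq_def]
    rw [dif_pos (by exact_mod_cast hlt : (head : Int) < (w.length : Int))]
    rw [show ((head : Int) + 1) = ((head + 1 : Nat) : Int) by push_cast; ring]
    simp only [PySem.List.pyGetD_natCast]
    by_cases hc : w.getD head ' ' = w.getD tail ' '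
    · -- equal branch: head advances, run extends
      have hcp : w[head] = w.getD tail ' ' := hget.symm.trans hc
      rw [if_pos hc]
      simp only [PySem.List.pyGetD_natCast]
      have hend : head + 1 < w.length := by
        rcases Nat.lt_or_ge (head + 1) w.length with h | h
        · exact h
        · exact absurd hc (hcorner (by omega))
      by_cases hcc : head + 1 = w.length - 1 ∧ w.getD (head + 1) ' ' = w.getD tail ' '
      · -- corner fires: next char is last and continues the run; finish by direct unfolding
        have hget2 : w.getD (head + 1) ' ' = w[head + 1] := List.getD_eq_getElem w ' ' hend
        have hdrop2 : w.drop (head + 1) = w[head + 1] :: w.drop (head + 2) :=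
          List.drop_eq_getElem_cons hend
        rw [if_pos ⟨by push_cast; omega, hcc.2⟩]
        rw [minReplaceWordLoop.eq_def]
        rw [dif_pos (by exact_mod_cast hend : ((head + 1 : Nat) : Int) < (w.length : Int))]
        rw [show (((head + 1 : Nat) : Int) + 1) = ((head + 2 : Nat) : Int) by push_cast; ring]
        simp only [PySem.List.pyGetD_natCast]
        rw [if_pos hcc.2]
        rw [if_neg (by
          rintro ⟨h1, -⟩
          have h2 : head + 2 = w.length := by omega
          rw [← h2] at h1
          omega)]
        rw [minReplaceWordLoop.eq_def]
        rw [dif_neg (by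
          have h2 : head + 2 = w.length := by omega
          rw [← h2]
          omega)]
        rw [hdrop, hdrop2, List.drop_eq_nil_of_le (by omega : w.length ≤ head + 2)]
        rw [runsum, if_pos hcp, runsum, if_pos (hget2.symm.trans hcc.2), runsum]
        rw [show (((head + 1 : Nat) : Int) - (tail : Int) + 1)
            = ((head : Int) - (tail : Int) + 1 + 1) by push_cast; ring]
      · -- no corner: recurse via IH on (head+1, tail)
        rw [if_neg (by rintro ⟨h1, h2⟩; exact hcc ⟨by omega, h2⟩)]
        rw [ih (head + 1) tail num (by omega) (by omega) hend
          (fun h2 h => hcc ⟨by omega, h⟩)]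
        rw [hdrop, runsum, if_pos hcp]
        rw [show (((head + 1 : Nat) : Int) - (tail : Int))
            = ((head : Int) - (tail : Int) + 1) by push_cast; ring]
    · -- unequal branch: current run ends at head; new run starts at head with char w[head]
      have hcn : ¬ (w[head] = w.getD tail ' ') := fun h => hc (hget.trans h)
      rw [if_neg hc]
      rw [show (if ((head : Int) ≠ (tail : Int) + 1) then
            ((head : Int), num + PySem.Int.floordiv ((head : Int) - (tail : Int)) 2)
          else ((tail : Int) + 1, num))
          = ((head : Int), num + PySem.Int.floordiv ((head : Int) - (tail : Int)) 2) from by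
        by_cases hht : head = tail + 1
        · rw [if_neg (by omega)]
          rw [show ((head : Int) - (tail : Int)) = 1 by omega, fd_one]
          rw [show ((tail : Int) + 1) = (head : Int) by omega]
          simp
        · rw [if_pos (by omega)]]
      simp only [PySem.List.pyGetD_natCast]
      by_cases hend : head + 1 = w.length
      · -- last iteration: loop exits right after
        rw [if_neg (by
          rintro ⟨h1, -⟩
          rw [← hend] at h1
          omega)]
        rw [minReplaceWordLoop.eq_def]
        rw [dif_neg (by rw [← hend]; omega)]
        rw [hdrop, List.drop_eq_nil_of_le (le_of_eq hend.symm)]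
        rw [runsum, if_neg hcn, runsum, fd_one]
        ring
      · have hend2 : head + 1 < w.length := by omega
        have hdrop2 : w.drop (head + 1) = w[head + 1] :: w.drop (head + 2) :=
          List.drop_eq_getElem_cons hend2
        have hget2 : w.getD (head + 1) ' ' = w[head + 1] := List.getD_eq_getElem w ' ' hend2
        by_cases hcc : head + 1 = w.length - 1 ∧ w.getD (head + 1) ' ' = w.getD head ' '
        · -- corner fires on the fresh two-char run at the end; finish by direct unfolding
          rw [if_pos ⟨by push_cast; omega, hcc.2⟩]
          rw [minReplaceWordLoop.eq_def]
          rw [dif_pos (by exact_mod_cast hend2 : ((head + 1 : Nat) : Int) < (w.length : Int))]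
          rw [show (((head + 1 : Nat) : Int) + 1) = ((head + 2 : Nat) : Int) by push_cast; ring]
          simp only [PySem.List.pyGetD_natCast]
          rw [if_pos hcc.2]
          rw [if_neg (by
            rintro ⟨h1, -⟩
            have h2 : head + 2 = w.length := by omega
            rw [← h2] at h1
            omega)]
          rw [minReplaceWordLoop.eq_def]
          rw [dif_neg (by
            have h2 : head + 2 = w.length := by omega
            rw [← h2]
            omega)]
          rw [hdrop, hdrop2, List.drop_eq_nil_of_le (by omega : w.length ≤ head + 2)]
          rw [runsum, if_neg hcn, runsum,
            if_pos (hget2.symm.trans (hcc.2.trans hget)), runsum]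
          rw [show (((head + 1 : Nat) : Int) - (head : Int) + 1) = ((1 : Int) + 1) by push_cast; ring]
          ring
        · -- no corner: recurse via IH on (head+1, head) with the fresh run
          rw [if_neg (by rintro ⟨h1, h2⟩; exact hcc ⟨by omega, h2⟩)]
          rw [ih (head + 1) head (num + PySem.Int.floordiv ((head : Int) - (tail : Int)) 2)
            (by omega) (by omega) hend2 (fun h2 h => hcc ⟨by omega, h⟩)]
          rw [hdrop, runsum, if_neg hcn, hget]
          rw [show (((head + 1 : Nat) : Int) - (head : Int)) = (1 : Int) by push_cast; ring]
          ring

theorem fd_even (j : Int) : PySem.Int.floordiv (2 * j) 2 = j := by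
  rw [PySem.Int.floordiv_eq_ediv_of_pos (by omega)]; omega

theorem fd_odd (j : Int) : PySem.Int.floordiv (2 * j + 1) 2 = j := by
  rw [PySem.Int.floordiv_eq_ediv_of_pos (by omega)]; omega

-- Bridge: the run-length sum equals the greedy pair count, tracked by the parity of the run.
theorem pc_nil : pairCount [] = 0 := rfl
theorem pc_one (c : Char) : pairCount [c] = 0 := rfl
theorem pc_cons (c d : Char) (rest : List Char) :
    pairCount (c :: d :: rest) = if d = c then 1 + pairCount rest else pairCount (d :: rest) := rfl

theorem runsum_pairCount (rest : List Char) : ∀ (c : Char) (j : Int),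
    (runsum c (2 * j) rest = j + pairCount rest) ∧
    (runsum c (2 * j + 1) rest = j + pairCount (c :: rest)) := by
  induction rest with
  | nil =>
    intro c j
    refine ⟨?_, ?_⟩
    · rw [runsum, fd_even, pc_nil]; ring
    · rw [runsum, fd_odd, pc_one]; ring
  | cons d rs ih =>
    intro c j
    by_cases h : d = c
    · subst h
      refine ⟨?_, ?_⟩
      · rw [runsum, if_pos rfl]
        exact (ih d j).2
      · rw [runsum, if_pos rfl, show 2 * j + 1 + 1 = 2 * (j + 1) from by ring]
        rw [pc_cons, if_pos rfl, (ih d (j + 1)).1]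
        ring
    · refine ⟨?_, ?_⟩
      · rw [runsum, if_neg h, fd_even]
        have h1 := (ih d 0).2
        simp only [mul_zero, zero_add] at h1
        rw [h1]
      · rw [runsum, if_neg h, fd_odd, pc_cons, if_neg h]
        have h1 := (ih d 0).2
        simp only [mul_zero, zero_add] at h1
        rw [h1]

theorem pairCount_short (l : List Char) (h : l.length ≤ 1) : pairCount l = 0 := by
  match l, h with
  | [], _ => rfl
  | [c], _ => rfl

-- B's index loop computes the greedy pair count of the suffix.
theorem loopB_pairCount (w : List Char) (m : Nat) :
    ∀ (i : Nat) (count : Int), w.length - i ≤ m →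
    minReplaceWordAltLoop w (w.length : Int) (i : Int) count = count + pairCount (w.drop i) := by
  induction m with
  | zero =>
    intro i count hm
    rw [minReplaceWordAltLoop.eq_def, dif_neg (by omega)]
    rw [List.drop_eq_nil_of_le (by omega), pc_nil]
    ring
  | succ m ih =>
    intro i count hm
    rw [minReplaceWordAltLoop.eq_def]
    by_cases hlt : i + 1 < w.length
    · rw [dif_pos (by omega)]
      have h0 : i < w.length := by omega
      have hdrop : w.drop i = w[i] :: w.drop (i + 1) := List.drop_eq_getElem_cons h0
      have hdrop2 : w.drop (i + 1) = w[i + 1] :: w.drop (i + 2) := List.drop_eq_getElem_cons hlt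
      rw [show ((i : Int) + 1) = ((i + 1 : Nat) : Int) by push_cast; ring]
      simp only [PySem.List.pyGetD_natCast]
      rw [List.getD_eq_getElem w ' ' h0, List.getD_eq_getElem w ' ' hlt]
      by_cases hc : w[i] = w[i + 1]
      · rw [if_pos hc]
        rw [show ((i : Int) + 2) = ((i + 2 : Nat) : Int) by push_cast; ring]
        rw [ih (i + 2) (count + 1) (by omega)]
        rw [hdrop, hdrop2, pc_cons, if_pos hc.symm]
        ring
      · rw [if_neg hc]
        rw [ih (i + 1) count (by omega)]
        rw [hdrop, hdrop2, pc_cons, if_neg (fun h => hc h.symm), ← hdrop2]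
    · rw [dif_neg (by omega)]
      rw [pairCount_short (w.drop i) (by simp; omega)]
      ring

theorem alt_eq_pairCount (word : String) : minReplaceWord_alt word = pairCount word.toList := by
  simp only [minReplaceWord_alt]
  have h := loopB_pairCount word.toList word.toList.length 0 0 (by omega)
  simpa using h

theorem minReplaceWord_eq_alt (word : String) : minReplaceWord word = minReplaceWord_alt word := by
  rw [alt_eq_pairCount]
  simp only [minReplaceWord]
  generalize word.toList = w
  rcases w with _ | ⟨a, _ | ⟨b, _ | ⟨c, rest⟩⟩⟩
  · -- empty word: A's loop exits at once; no pair
    rw [minReplaceWordLoop.eq_def, pc_nil]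
    norm_num
  · -- one char: A's n = 1 case; no pair
    rw [pc_one]
    simp
  · -- two chars: A's n = 2 case compares a = b; B counts the single potential pair
    have g0 : PySem.List.pyGetD [a, b] (0 : Int) ' ' = a := rfl
    have g1 : PySem.List.pyGetD [a, b] (1 : Int) ' ' = b := rfl
    have h2 : (([a, b] : List Char).length : Int) = 2 := by norm_num
    rw [h2]
    rw [pc_cons]
    norm_num [g0, g1]
    by_cases hab : b = a
    · rw [if_pos hab.symm, if_pos hab, pc_nil]
      ring
    · rw [if_neg (fun h => hab h.symm), if_neg hab, pc_one]
  · -- at least three chars: both sides reduce to runsum a 1 (b :: c :: rest)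
    have hlen : (a :: b :: c :: rest).length = rest.length + 3 := by simp
    rw [if_neg (by rw [hlen]; push_cast; omega), if_neg (by rw [hlen]; push_cast; omega)]
    have hA := loopA_runsum (a :: b :: c :: rest) (a :: b :: c :: rest).length 1 0 0
      (by omega) (by omega) (by simp) (by rw [hlen]; omega)
    push_cast at hA
    rw [hA]
    have hO := (runsum_pairCount (b :: c :: rest) a 0).2
    simp only [mul_zero, zero_add] at hO
    simpa using hO

-- ===== VERDICT (by name: the statement is the Claim_ definition above) =====
theorem minReplaceWord_spec : Claim_equal_minReplaceWord := by
  intro word _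
  exact minReplaceWord_eq_alt word
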